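-- pv_equiv track=rewrite | github.com/pypi-data/pypi-mirror-381 | packages/eratos-sdk/eratos_sdk-0.20.0.tar.gz/eratos_sdk-0.20.0/eratos/dsutil/manifest.py | __calc_auto_chunk_size
-- ===== SOURCE A (Python) =====
-- def __calc_auto_chunk_size(contentSize):
--     fileToHashSize = [
--         [10485760, 262144],
--         [20971520, 524288],
--         [41943040, 1048576],
--         [83886080, 2097152],
--         [167772160, 4194304],
--         [335544320, 8388608],
--         [671088640, 16777216]
--     ]
--     for hs in fileToHashSize:
--         if contentSize < hs[0]:
--             return hs[1]
--     return fileToHashSize[-1][1]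
-- ===== SOURCE B (Python) =====
-- def __calc_auto_chunk_size(contentSize):
--     # Closed form: thresholds are 10485760*2^k, hash sizes 262144*2^k (k=0..6).
--     if contentSize < 10485760:
--         return 262144
--     q = contentSize // 10485760
--     return 262144 << min(6, q.bit_length())
-- ===== Notes on version B (the rewrite author's own statement) =====
-- stated objective: alternative
-- what changed: Replaced the linear scan of the threshold table by a closed-form computation: thresholds and hash sizes both double per row, so the answer is the base hash size left-shifted by min(6, bit_length of the size floor-divided by the base threshold), using exact integer arithmetic (no floats).
import Mathlib
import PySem

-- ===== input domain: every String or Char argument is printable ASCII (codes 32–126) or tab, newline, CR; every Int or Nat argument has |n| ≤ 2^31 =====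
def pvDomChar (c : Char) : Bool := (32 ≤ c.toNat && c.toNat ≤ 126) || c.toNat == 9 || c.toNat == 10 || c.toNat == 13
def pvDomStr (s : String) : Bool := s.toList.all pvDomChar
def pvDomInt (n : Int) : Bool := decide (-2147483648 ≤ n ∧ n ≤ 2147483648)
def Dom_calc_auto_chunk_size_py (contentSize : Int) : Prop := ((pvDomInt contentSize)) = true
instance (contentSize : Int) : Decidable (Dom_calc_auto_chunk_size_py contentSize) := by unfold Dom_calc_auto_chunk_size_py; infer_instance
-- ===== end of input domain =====

-- B replaces A's row-by-row table scan by a closed-form bit_length computation (alternative, same cost).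

-- ===== PORT A =====
def pvFileToHashSize : List (Int × Int) :=
  [(10485760, 262144), (20971520, 524288), (41943040, 1048576), (83886080, 2097152),
   (167772160, 4194304), (335544320, 8388608), (671088640, 16777216)]

-- the 'for hs in fileToHashSize: if contentSize < hs[0]: return hs[1]' loop;
-- the [] case is the fall-through 'return fileToHashSize[-1][1]' (= 16777216)
def pvScanA (c : Int) : List (Int × Int) → Int
  | [] => 16777216
  | hs :: rest => if c < hs.1 then hs.2 else pvScanA c rest

def calc_auto_chunk_size_py (contentSize : Int) : Int :=
  pvScanA contentSize pvFileToHashSize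

-- ===== PORT B =====
-- '262144 << k' ported as 262144 * 2 ^ k; q.bit_length() is PySem.Int.bitLength
def calc_auto_chunk_size_py_alt (contentSize : Int) : Int :=
  if contentSize < 10485760 then 262144
  else
    let q := PySem.Int.floordiv contentSize 10485760
    262144 * 2 ^ (min 6 (PySem.Int.bitLength q))

-- ===== PRECONDITION & SPEC =====
def Spec_calc_auto_chunk_size_py (contentSize : Int) (out : Int) : Prop := out = calc_auto_chunk_size_py_alt contentSize
instance (contentSize : Int) (out : Int) : Decidable (Spec_calc_auto_chunk_size_py contentSize out) := by unfold Spec_calc_auto_chunk_size_py; infer_instance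

-- ===== CLAIM (what is proved, stated in full; the proofs are below) =====
def Claim_equal_calc_auto_chunk_size_py : Prop := ∀ (contentSize : Int), Dom_calc_auto_chunk_size_py contentSize → Spec_calc_auto_chunk_size_py contentSize (calc_auto_chunk_size_py contentSize)

-- ===== LEMMAS AND PROOFS =====

-- bitLength is pinned by a power-of-two bracket
lemma pvBL_eq (q : Int) (k : Nat) (hk : 1 ≤ k) (h1 : (2:Int)^(k-1) ≤ q) (h2 : q < (2:Int)^k) :
    PySem.Int.bitLength q = k := by
  have hq0 : 0 < q := lt_of_lt_of_le (pow_pos (by norm_num) (k-1)) h1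
  have hlo : 2^(k-1) ≤ q.natAbs := by
    have h := h1
    rw [← Int.natAbs_of_nonneg hq0.le] at h
    exact_mod_cast h
  have hhi : q.natAbs < 2^k := by
    have : (q.natAbs : Int) < (2:Int)^k := by rwa [Int.natAbs_of_nonneg hq0.le]
    exact_mod_cast this
  have hA := PySem.Int.lt_two_pow_bitLength q
  have hB := PySem.Int.two_pow_bitLength_le q (by omega)
  set bl := PySem.Int.bitLength q with hbl
  have h1' : k - 1 < bl := by
    have : (2:Nat)^(k-1) < 2^bl := lt_of_le_of_lt hlo hA
    exact (Nat.pow_lt_pow_iff_right (by norm_num)).mp this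
  have h2' : bl - 1 < k := by
    have : (2:Nat)^(bl-1) < 2^k := lt_of_le_of_lt hB hhi
    exact (Nat.pow_lt_pow_iff_right (by norm_num)).mp this
  have hbl1 : 1 ≤ bl := by
    have := PySem.Int.two_pow_bitLength_le q (by omega)
    by_contra h
    interval_cases bl <;> simp_all <;> omega
  omega

lemma pvBL_ge (q : Int) (k : Nat) (h1 : (2:Int)^k ≤ q) : k < PySem.Int.bitLength q := by
  have hq0 : 0 < q := lt_of_lt_of_le (pow_pos (by norm_num) k) h1
  have hlo : 2^k ≤ q.natAbs := by
    have h := h1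
    rw [← Int.natAbs_of_nonneg hq0.le] at h
    exact_mod_cast h
  have hA := PySem.Int.lt_two_pow_bitLength q
  exact (Nat.pow_lt_pow_iff_right (by norm_num)).mp (lt_of_le_of_lt hlo hA)

-- the exponent B computes, on each threshold band
lemma pvB_band (c : Int) (k : Nat) (hk : 1 ≤ k) (hk6 : k ≤ 6)
    (hlo : 10485760 * 2^(k-1) ≤ c) (hhi : c < 10485760 * 2^k) :
    min 6 (PySem.Int.bitLength (c / 10485760)) = k := by
  rw [← PySem.Int.floordiv_eq_ediv_of_pos (by norm_num : (0:Int) < 10485760)]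
  have hq1 : (2:Int)^(k-1) ≤ PySem.Int.floordiv c 10485760 := by
    rw [PySem.Int.le_floordiv_iff_mul_le (by norm_num)]; linarith
  have hq2 : PySem.Int.floordiv c 10485760 < (2:Int)^k := by
    rw [PySem.Int.floordiv_lt_iff_lt_mul (by norm_num)]; linarith
  rw [pvBL_eq _ k hk hq1 hq2]; omega

lemma pvB_top (c : Int) (hlo : 10485760 * 2^6 ≤ c) :
    min 6 (PySem.Int.bitLength (c / 10485760)) = 6 := by
  rw [← PySem.Int.floordiv_eq_ediv_of_pos (by norm_num : (0:Int) < 10485760)]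
  have hq1 : (2:Int)^6 ≤ PySem.Int.floordiv c 10485760 := by
    rw [PySem.Int.le_floordiv_iff_mul_le (by norm_num)]; linarith
  have := pvBL_ge _ 6 hq1
  omega

-- ===== VERDICT (by name: the statement is the Claim_ definition above) =====
theorem calc_auto_chunk_size_py_spec : Claim_equal_calc_auto_chunk_size_py := by
  intro c _
  unfold Spec_calc_auto_chunk_size_py calc_auto_chunk_size_py calc_auto_chunk_size_py_alt
  simp only [pvFileToHashSize, pvScanA]
  by_cases h0 : c < 10485760
  · simp [h0]
  by_cases h1 : c < 20971520
  · simp [h0, h1]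
    rw [pvB_band c 1 (by norm_num) (by norm_num) (by norm_num; omega) (by norm_num; omega)]
    norm_num
  by_cases h2 : c < 41943040
  · simp [h0, h1, h2]
    rw [pvB_band c 2 (by norm_num) (by norm_num) (by norm_num; omega) (by norm_num; omega)]
    norm_num
  by_cases h3 : c < 83886080
  · simp [h0, h1, h2, h3]
    rw [pvB_band c 3 (by norm_num) (by norm_num) (by norm_num; omega) (by norm_num; omega)]
    norm_num
  by_cases h4 : c < 167772160
  · simp [h0, h1, h2, h3, h4]
    rw [pvB_band c 4 (by norm_num) (by norm_num) (by norm_num; omega) (by norm_num; omega)]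
    norm_num
  by_cases h5 : c < 335544320
  · simp [h0, h1, h2, h3, h4, h5]
    rw [pvB_band c 5 (by norm_num) (by norm_num) (by norm_num; omega) (by norm_num; omega)]
    norm_num
  by_cases h6 : c < 671088640
  · simp [h0, h1, h2, h3, h4, h5, h6]
    rw [pvB_band c 6 (by norm_num) (by norm_num) (by norm_num; omega) (by norm_num; omega)]
    norm_num
  · simp [h0, h1, h2, h3, h4, h5, h6]
    rw [pvB_top c (by norm_num; omega)]
    norm_num
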